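-- pv_equiv track=rewrite | github.com/Egxon/test | SAE_Test.py | ef_4
-- ===== SOURCE A (Python) =====
-- def ef_4(cc):
--     res = ""
--     i = 0
--     cal=0
--     while i < len(cc):
--         if cc[i] == " ":
--             j = 1
--
--             while i+j < len(cc) and cc[i+j] == " ":
--                 j += 1
--
--             if j > 1:
--                 res += " "*(j)
--                 i += j-1
--
--         else:
--             res += cc[i]
--
--         i += 1
--
--
--     return res
-- ===== SOURCE B (Python) =====
-- def ef_4(cc):
--     runs = []
--     for ch in cc:
--         if runs and (runs[-1][0] == ' ') == (ch == ' '):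
--             runs[-1] += ch
--         else:
--             runs.append(ch)
--     return ''.join(r for r in runs if r != ' ')
-- ===== Notes on version B (the rewrite author's own statement) =====
-- stated objective: simpler
-- what changed: Replaces A's index walk with nested while-scans over space runs by a single fold that groups the string into maximal space/non-space runs, then joins all runs except those equal to a single space.
import Mathlib
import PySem

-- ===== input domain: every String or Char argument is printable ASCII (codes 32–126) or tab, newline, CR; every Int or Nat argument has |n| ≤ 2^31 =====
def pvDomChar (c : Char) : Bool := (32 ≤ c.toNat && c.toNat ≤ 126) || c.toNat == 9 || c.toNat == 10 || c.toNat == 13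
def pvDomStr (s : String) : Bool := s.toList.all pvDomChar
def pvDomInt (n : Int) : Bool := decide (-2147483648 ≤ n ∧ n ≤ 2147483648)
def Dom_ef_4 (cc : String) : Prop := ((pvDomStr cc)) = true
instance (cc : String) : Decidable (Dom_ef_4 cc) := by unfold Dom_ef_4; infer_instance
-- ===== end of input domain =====

-- B groups the string into maximal runs of spaces/non-spaces in one fold, then drops
-- the runs that are exactly a single space and joins the rest (objective: simpler).

-- ===== PORT A =====
-- inner while of A: number of leading spaces of the remaining suffix
def ef4leadSp : List Char → Nat
  | [] => 0
  | c :: t => if c = ' ' then ef4leadSp t + 1 else 0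

-- outer while of A, as recursion over the suffix at index i; res is A's accumulator
def ef4go (res : List Char) : List Char → List Char
  | [] => res
  | c :: rest =>
    if c = ' ' then
      let j := 1 + ef4leadSp rest
      if 1 < j then ef4go (res ++ List.replicate j ' ') (rest.drop (j - 1))
      else ef4go res rest
    else ef4go (res ++ [c]) rest
termination_by l => l.length
decreasing_by
  · simp only [List.length_drop, List.length_cons]; omega
  · simp
  · simp

def ef_4 (cc : String) : String := String.mk (ef4go [] cc.toList)

-- ===== PORT B =====
-- the for-loop of B: grow the last run or start a new one
def ef4step (runs : List (List Char)) (ch : Char) : List (List Char) :=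
  match runs.getLast? with
  | some r => if (r.head? = some ' ') = (ch = ' ') then runs.dropLast ++ [r ++ [ch]]
              else runs ++ [[ch]]
  | none => [[ch]]

def ef_4_alt (cc : String) : String :=
  let runs := cc.toList.foldl ef4step []
  String.mk ((runs.filter (fun r => r ≠ [' '])).flatten)

-- ===== PRECONDITION & SPEC =====
def Spec_ef_4 (cc : String) (out : String) : Prop := out = ef_4_alt cc
instance (cc : String) (out : String) : Decidable (Spec_ef_4 cc out) := by unfold Spec_ef_4; infer_instance

-- ===== CLAIM (what is proved, stated in full; the proofs are below) =====
def Claim_equal_ef_4 : Prop := ∀ (cc : String), Dom_ef_4 cc → Spec_ef_4 cc (ef_4 cc)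

-- ===== LEMMAS AND PROOFS =====

-- proof-only: run decomposition of a list of chars (maximal runs of spaces / non-spaces)
def ef4p (c : Char) : Char → Bool := fun x => decide ((x = ' ') = (c = ' '))

def ef4grp : List Char → List (List Char)
  | [] => []
  | c :: rest =>
      ((c :: rest).takeWhile (ef4p c)) :: ef4grp ((c :: rest).dropWhile (ef4p c))
termination_by l => l.length
decreasing_by
  simp only [List.dropWhile]
  have : ef4p c c = true := by simp [ef4p]
  rw [this]
  have := List.length_dropWhile_le (ef4p c) rest
  simp; omega

def ef4flat (l : List Char) : List Char :=
  ((ef4grp l).filter (fun r => r ≠ [' '])).flatten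

theorem ef4grp_cons (c : Char) (rest : List Char) :
    ef4grp (c :: rest) =
      (c :: rest.takeWhile (ef4p c)) :: ef4grp (rest.dropWhile (ef4p c)) := by
  rw [ef4grp]
  have h : ef4p c c = true := by simp [ef4p]
  simp [List.takeWhile, List.dropWhile, h]

theorem ef4_fold_inv (l : List Char) :
    ∀ (acc : List (List Char)) (cur : List Char) (c : Char), cur.head? = some c →
      List.foldl ef4step (acc ++ [cur]) l =
        acc ++ (cur ++ l.takeWhile (ef4p c)) :: ef4grp (l.dropWhile (ef4p c)) := by
  induction l with
  | nil => intro acc cur c _; simp [ef4grp]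
  | cons ch t ih =>
    intro acc cur c hc
    have hcur : cur ≠ [] := by cases cur <;> simp_all
    have hlast : (acc ++ [cur]).getLast? = some cur := by simp
    have hhead : cur.head? = some c := hc
    by_cases h : (c = ' ') = (ch = ' ')
    · have hp : ef4p c ch = true := by simp [ef4p, h.symm]
      have hcond : (cur.head? = some ' ') = (ch = ' ') := by
        rw [hhead]
        simp only [Option.some_inj]
        exact h ▸ rfl
      have step : ef4step (acc ++ [cur]) ch = acc ++ [cur ++ [ch]] := by
        simp [ef4step, hlast, hcond]
      rw [List.foldl_cons, step,
        ih acc (cur ++ [ch]) c (by cases cur <;> simp_all)]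
      simp [List.takeWhile, List.dropWhile, hp]
    · have hp : ef4p c ch = false := by
        simp only [ef4p, decide_eq_false_iff_not]
        exact fun hh => h hh.symm
      have hcond : ¬ ((cur.head? = some ' ') = (ch = ' ')) := by
        rw [hhead]
        simp only [Option.some_inj]
        exact fun hh => h hh
      have step : ef4step (acc ++ [cur]) ch = (acc ++ [cur]) ++ [[ch]] := by
        simp [ef4step, hlast, hcond]
      rw [List.foldl_cons, step, ih (acc ++ [cur]) [ch] ch (by simp)]
      rw [show List.takeWhile (ef4p c) (ch :: t) = [] from by simp [hp],
        show List.dropWhile (ef4p c) (ch :: t) = ch :: t from by simp [hp], ef4grp_cons]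
      simp

theorem ef4_fold_grp (l : List Char) : List.foldl ef4step [] l = ef4grp l := by
  cases l with
  | nil => simp [ef4grp]
  | cons c t =>
    have step : ef4step [] c = [[c]] := by simp [ef4step]
    rw [List.foldl_cons, step]
    have := ef4_fold_inv t [] [c] c (by simp)
    simpa [ef4grp_cons] using this

theorem ef4_takeWhile_sp (l : List Char) :
    l.takeWhile (ef4p ' ') = List.replicate (ef4leadSp l) ' ' := by
  induction l with
  | nil => rfl
  | cons c t ih =>
    by_cases h : c = ' '
    · subst h
      simp [List.takeWhile, ef4p, ef4leadSp, List.replicate_succ, ih]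
    · have hp : ef4p ' ' c = false := by simp [ef4p, h]
      simp [List.takeWhile, ef4leadSp, h, hp]

theorem ef4_dropWhile_sp (l : List Char) :
    l.dropWhile (ef4p ' ') = l.drop (ef4leadSp l) := by
  induction l with
  | nil => rfl
  | cons c t ih =>
    by_cases h : c = ' '
    · subst h
      simp [List.dropWhile, ef4p, ef4leadSp, ih]
    · have hp : ef4p ' ' c = false := by simp [ef4p, h]
      simp [List.dropWhile, ef4leadSp, h, hp]

theorem ef4flat_nonsp_shift (c : Char) (rest : List Char) (hc : ¬ c = ' ') :
    ef4flat rest = rest.takeWhile (ef4p c) ++ ef4flat (rest.dropWhile (ef4p c)) := by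
  cases rest with
  | nil => simp [ef4flat, ef4grp]
  | cons d t =>
    by_cases hd : d = ' '
    · have hp : ef4p c d = false := by simp [ef4p, hd, eq_iff_iff, hc]
      simp [hp]
    · have hfun : ef4p c = ef4p d := by
        funext x; simp [ef4p, eq_iff_iff, hc, hd]
      have hp : ef4p d d = true := by simp [ef4p]
      rw [hfun, ef4flat, ef4grp_cons]
      simp [hd, hp, ef4flat]

theorem ef4flat_nonsp (c : Char) (rest : List Char) (hc : ¬ c = ' ') :
    ef4flat (c :: rest) = c :: ef4flat rest := by
  rw [ef4flat, ef4grp_cons]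
  have := ef4flat_nonsp_shift c rest hc
  simp [hc, ef4flat] at this ⊢
  rw [← this]

theorem ef4flat_sp0 (rest : List Char) (h : ef4leadSp rest = 0) :
    ef4flat (' ' :: rest) = ef4flat rest := by
  rw [ef4flat, ef4grp_cons, ef4_takeWhile_sp, ef4_dropWhile_sp, h]
  simp [ef4flat]

theorem ef4flat_spk (rest : List Char) (h : 0 < ef4leadSp rest) :
    ef4flat (' ' :: rest) =
      List.replicate (1 + ef4leadSp rest) ' ' ++ ef4flat (rest.drop (ef4leadSp rest)) := by
  rw [ef4flat, ef4grp_cons, ef4_takeWhile_sp, ef4_dropWhile_sp]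
  have hne : (' ' :: List.replicate (ef4leadSp rest) ' ') ≠ [' '] := by
    intro hEq
    have : ef4leadSp rest = 0 := by
      simpa using congrArg List.length hEq
    omega
  rw [show (1 : Nat) + ef4leadSp rest = ef4leadSp rest + 1 from Nat.add_comm _ _,
    List.replicate_succ]
  simp [hne, ef4flat]

theorem ef4go_flat_aux : ∀ (n : Nat) (l : List Char), l.length ≤ n →
    ∀ (res : List Char), ef4go res l = res ++ ef4flat l := by
  intro n
  induction n with
  | zero =>
    intro l hl res
    have hnil : l = [] := by cases l <;> simp_all
    subst hnil
    simp [ef4go, ef4flat, ef4grp]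
  | succ n ih =>
    intro l hl res
    match l with
    | [] => simp [ef4go, ef4flat, ef4grp]
    | c :: rest =>
      have hrest : rest.length ≤ n := by simp at hl; omega
      rw [ef4go]
      by_cases hc : c = ' '
      · subst hc
        by_cases hk : 1 < 1 + ef4leadSp rest
        · have hkpos : 0 < ef4leadSp rest := by omega
          simp only [if_pos hk]
          have hdroplen : (rest.drop (1 + ef4leadSp rest - 1)).length ≤ n := by
            simp [List.length_drop]; omega
          rw [ih _ hdroplen, ef4flat_spk rest hkpos,
            show 1 + ef4leadSp rest - 1 = ef4leadSp rest from by omega]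
          simp
        · have hk0 : ef4leadSp rest = 0 := by omega
          simp only [if_neg hk]
          rw [ih _ hrest, ef4flat_sp0 rest hk0]
          simp
      · simp only [if_neg hc]
        rw [ih _ hrest, ef4flat_nonsp c rest hc]
        simp

theorem ef4go_flat (l : List Char) : ∀ (res : List Char),
    ef4go res l = res ++ ef4flat l :=
  ef4go_flat_aux l.length l (Nat.le_refl _)

theorem ef4_alt_eq (cc : String) :
    ef_4_alt cc = String.mk (ef4flat cc.toList) := by
  simp [ef_4_alt, ef4_fold_grp, ef4flat]

-- ===== VERDICT (by name: the statement is the Claim_ definition above) =====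
theorem ef_4_spec : Claim_equal_ef_4 := by
  intro cc _
  unfold Spec_ef_4
  rw [ef4_alt_eq, ef_4, ef4go_flat]
  simp
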